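-- pv_equiv track=rewrite | github.com/Mersikka/tira | tira2/listgame.py | first_wins
-- ===== SOURCE A (Python) =====
-- def first_wins(numbers):
--     p1 = 0
--     p2 = 0
--     lp = 0
--     rp = len(numbers)-1
--     while lp <= rp:
--         if lp == rp:
--             p1 += numbers[lp]
--         else:
--             p1 += max(numbers[lp], numbers[rp])
--             p2 += min(numbers[lp], numbers[rp])
--         lp += 1
--         rp -= 1
--     return p1 > p2
-- ===== SOURCE B (Python) =====
-- def first_wins(numbers):
--     s = sum(numbers)
--     t = sum(max(a, b) for a, b in zip(numbers, reversed(numbers)))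
--     if len(numbers) % 2 == 1:
--         t += numbers[len(numbers) // 2]
--     return t > s
-- ===== Notes on version B (the rewrite author's own statement) =====
-- stated objective: idiomatic
-- what changed: B drops A's two-pointer min/max double accumulator: using max(a,b)+min(a,b)=a+b it computes in two staged builtin passes the total sum s and the sum t of max(a,b) over the list zipped with its reverse, adds the middle element when the length is odd, and returns t > s.
import Mathlib
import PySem

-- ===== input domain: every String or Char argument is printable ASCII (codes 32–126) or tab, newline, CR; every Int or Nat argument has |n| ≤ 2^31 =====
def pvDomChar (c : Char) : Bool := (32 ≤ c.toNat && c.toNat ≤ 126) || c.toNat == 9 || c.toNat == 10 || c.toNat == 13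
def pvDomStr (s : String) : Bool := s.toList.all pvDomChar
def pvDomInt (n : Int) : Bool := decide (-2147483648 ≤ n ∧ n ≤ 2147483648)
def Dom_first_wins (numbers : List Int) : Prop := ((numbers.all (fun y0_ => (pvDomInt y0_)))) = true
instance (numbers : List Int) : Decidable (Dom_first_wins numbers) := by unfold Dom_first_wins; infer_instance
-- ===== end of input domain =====

-- B drops A's two-pointer min/max accumulators: via max(a,b)+min(a,b)=a+b it compares
-- the sum of max over the list zipped with its reverse (plus the middle element when
-- the length is odd) against the plain total sum; same O(n) cost, plainer code.

-- ===== PORT A =====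
-- the while-loop of A, state (lp, rp, p1, p2); indices are always in range when called
-- from first_wins, so pyGetD _ _ 0 is exact there
def firstWinsLoop (numbers : List Int) (lp rp p1 p2 : Int) : Int × Int :=
  if lp ≤ rp then
    if lp = rp then
      firstWinsLoop numbers (lp + 1) (rp - 1) (p1 + PySem.List.pyGetD numbers lp 0) p2
    else
      firstWinsLoop numbers (lp + 1) (rp - 1)
        (p1 + max (PySem.List.pyGetD numbers lp 0) (PySem.List.pyGetD numbers rp 0))
        (p2 + min (PySem.List.pyGetD numbers lp 0) (PySem.List.pyGetD numbers rp 0))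
  else (p1, p2)
termination_by (rp + 1 - lp).toNat
decreasing_by all_goals omega

def first_wins (numbers : List Int) : Bool :=
  let r := firstWinsLoop numbers 0 ((numbers.length : Int) - 1) 0 0
  decide (r.1 > r.2)

-- ===== PORT B =====
def first_wins_alt (numbers : List Int) : Bool :=
  let s : Int := numbers.sum
  let t : Int := ((numbers.zip numbers.reverse).map (fun p => max p.1 p.2)).sum
  let t :=
    if PySem.Int.mod (numbers.length : Int) 2 = 1 then
      t + PySem.List.pyGetD numbers (PySem.Int.floordiv (numbers.length : Int) 2) 0
    else t
  decide (t > s)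

-- ===== PRECONDITION & SPEC =====
def Spec_first_wins (numbers : List Int) (out : Bool) : Prop := out = first_wins_alt numbers
instance (numbers : List Int) (out : Bool) : Decidable (Spec_first_wins numbers out) := by unfold Spec_first_wins; infer_instance

-- ===== CLAIM (what is proved, stated in full; the proofs are below) =====
def Claim_equal_first_wins : Prop := ∀ (numbers : List Int), Dom_first_wins numbers → Spec_first_wins numbers (first_wins numbers)

-- ===== LEMMAS AND PROOFS =====

-- the pair margin p1 - p2 accumulated by A's loop, as its own recursion
def pairD (xs : List Int) (lp rp : Int) : Int :=
  if lp ≤ rp then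
    (if lp = rp then PySem.List.pyGetD xs lp 0
     else |PySem.List.pyGetD xs lp 0 - PySem.List.pyGetD xs rp 0|) + pairD xs (lp + 1) (rp - 1)
  else 0
termination_by (rp + 1 - lp).toNat
decreasing_by all_goals omega

theorem firstWinsLoop_margin (xs : List Int) (lp rp p1 p2 : Int) :
    (firstWinsLoop xs lp rp p1 p2).1 - (firstWinsLoop xs lp rp p1 p2).2
      = (p1 - p2) + pairD xs lp rp := by
  fun_induction firstWinsLoop xs lp rp p1 p2 with
  | case1 rp p1 p2 hle ih =>
    rw [pairD]
    simp only [le_refl, if_pos] at ⊢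
    rw [ih, pairD]
    have hstop : ¬ rp + 1 ≤ rp - 1 := by omega
    simp [hstop]
    omega
  | case2 lp rp p1 p2 hle hne ih =>
    rw [pairD, if_pos hle, if_neg hne, ih]
    have h := max_sub_min_eq_abs (PySem.List.pyGetD xs lp 0) (PySem.List.pyGetD xs rp 0)
    rw [abs_sub_comm] at h
    omega
  | case3 lp rp p1 p2 hle =>
    rw [pairD]; simp [hle]

-- the closed form of pairD on a window of integer width k
theorem pairD_closed (xs : List Int) :
    ∀ (k : Nat) (lp rp : Int), rp + 1 - lp = (k : Int) →
      pairD xs lp rp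
        = (∑ j ∈ Finset.range (k / 2),
            |PySem.List.pyGetD xs (lp + j) 0 - PySem.List.pyGetD xs (rp - j) 0|)
          + (if k % 2 = 1 then PySem.List.pyGetD xs (lp + (k / 2 : Nat)) 0 else 0) := by
  intro k
  induction k using Nat.strong_induction_on with
  | _ k ih =>
    intro lp rp hk
    match k, ih with
    | 0, _ =>
      rw [pairD]
      have : ¬ lp ≤ rp := by omega
      simp [this]
    | 1, _ =>
      rw [pairD]
      have h1 : lp ≤ rp := by omega
      have h2 : lp = rp := by omega
      rw [pairD]
      have : ¬ lp + 1 ≤ rp - 1 := by omega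
      simp [h2]
    | (m + 2), ih =>
      have h1 : lp ≤ rp := by push_cast at hk; omega
      have h2 : lp ≠ rp := by push_cast at hk; omega
      rw [pairD, if_pos h1, if_neg h2]
      have hdiv : (m + 2) / 2 = m / 2 + 1 := by omega
      have hmod : (m + 2) % 2 = m % 2 := by omega
      rw [ih m (by omega) (lp + 1) (rp - 1) (by push_cast at hk ⊢; omega)]
      rw [hdiv, hmod, Finset.sum_range_succ']
      have hmid : lp + 1 + ((m / 2 : Nat) : Int) = lp + ((m / 2 + 1 : Nat) : Int) := by
        push_cast; ring
      rw [hmid]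
      have hsum : ∀ j ∈ Finset.range (m / 2),
          |PySem.List.pyGetD xs (lp + 1 + (j : Int)) 0 - PySem.List.pyGetD xs (rp - 1 - (j : Int)) 0|
            = |PySem.List.pyGetD xs (lp + ((j + 1 : Nat) : Int)) 0
                - PySem.List.pyGetD xs (rp - ((j + 1 : Nat) : Int)) 0| := by
        intro j _
        have e1 : lp + 1 + (j : Int) = lp + ((j + 1 : Nat) : Int) := by push_cast; ring
        have e2 : rp - 1 - (j : Int) = rp - ((j + 1 : Nat) : Int) := by push_cast; ring
        rw [e1, e2]
      rw [Finset.sum_congr rfl hsum]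
      simp only [Nat.cast_zero, add_zero, sub_zero]
      ring

-- A's margin as a Nat-indexed pair sum plus the middle element
def pairSum (xs : List Int) : Int :=
  ∑ j ∈ Finset.range (xs.length / 2), |xs.getD j 0 - xs.getD (xs.length - 1 - j) 0|

def halfSum (xs : List Int) : Int :=
  pairSum xs + (if xs.length % 2 = 1 then xs.getD (xs.length / 2) 0 else 0)

theorem pairD_eq_halfSum (xs : List Int) :
    pairD xs 0 ((xs.length : Int) - 1) = halfSum xs := by
  rw [pairD_closed xs xs.length 0 ((xs.length : Int) - 1) (by ring)]
  unfold halfSum pairSum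
  congr 1
  · apply Finset.sum_congr rfl
    intro j hj
    have hj' : j < xs.length / 2 := Finset.mem_range.mp hj
    have e1 : (0 : Int) + (j : Int) = ((j : Nat) : Int) := by ring
    have e2 : (xs.length : Int) - 1 - (j : Int) = ((xs.length - 1 - j : Nat) : Int) := by
      omega
    rw [e1, e2, PySem.List.pyGetD_natCast, PySem.List.pyGetD_natCast]
  · split_ifs with h
    · have e : (0 : Int) + ((xs.length / 2 : Nat) : Int) = ((xs.length / 2 : Nat) : Int) := by ring
      rw [e, PySem.List.pyGetD_natCast]
    · rfl

-- window identity for B: max-sum over a reflected window = plain sum + pair |diff| sum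
theorem maxWindow (g : Nat → Int) :
    ∀ (k lo hi : Nat), hi - lo = k → lo ≤ hi →
      (∑ i ∈ Finset.Ico lo hi, max (g i) (g (lo + hi - 1 - i)))
        = (∑ i ∈ Finset.Ico lo hi, g i)
          + ∑ j ∈ Finset.range (k / 2), |g (lo + j) - g (hi - 1 - j)| := by
  intro k
  induction k using Nat.strong_induction_on with
  | _ k ih =>
    intro lo hi hk hle
    match k, ih with
    | 0, _ =>
      have : hi = lo := by omega
      subst this; simp
    | 1, _ =>
      have hhi : hi = lo + 1 := by omega
      subst hhi
      have hico : Finset.Ico lo (lo + 1) = {lo} := by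
        ext x; simp
      rw [hico]
      simp
    | (m + 2), ih =>
      have h2 : lo + 2 ≤ hi := by omega
      have hsplit : ∀ f : Nat → Int,
          (∑ i ∈ Finset.Ico lo hi, f i)
            = f lo + (∑ i ∈ Finset.Ico (lo + 1) (hi - 1), f i) + f (hi - 1) := by
        intro f
        have e1 : (∑ i ∈ Finset.Ico lo hi, f i)
            = f lo + ∑ i ∈ Finset.Ico (lo + 1) hi, f i := by
          rw [← Finset.sum_eq_sum_Ico_succ_bot (by omega : lo < hi)]
        have e2 : (∑ i ∈ Finset.Ico (lo + 1) hi, f i)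
            = (∑ i ∈ Finset.Ico (lo + 1) (hi - 1), f i) + f (hi - 1) := by
          have : hi = (hi - 1) + 1 := by omega
          rw [this, Finset.sum_Ico_succ_top (by omega)]
          norm_num
        rw [e1, e2]; ring
      rw [hsplit, hsplit (fun i => g i)]
      have hinner : (∑ i ∈ Finset.Ico (lo + 1) (hi - 1), max (g i) (g (lo + hi - 1 - i)))
          = (∑ i ∈ Finset.Ico (lo + 1) (hi - 1), g i)
            + ∑ j ∈ Finset.range (m / 2), |g (lo + 1 + j) - g (hi - 1 - 1 - j)| := by
      -- inner window has the same reflection constant: (lo+1)+(hi-1)-1 = lo+hi-1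
        have := ih m (by omega) (lo + 1) (hi - 1) (by omega) (by omega)
        rw [← this]
        apply Finset.sum_congr rfl
        intro i hi'
        have := Finset.mem_Ico.mp hi'
        congr 2
        omega
      rw [hinner]
      have hends : max (g lo) (g (lo + hi - 1 - lo)) + max (g (hi - 1)) (g (lo + hi - 1 - (hi - 1)))
          = g lo + g (hi - 1) + |g lo - g (hi - 1)| := by
        have e1 : lo + hi - 1 - lo = hi - 1 := by omega
        have e2 : lo + hi - 1 - (hi - 1) = lo := by omega
        rw [e1, e2]
        rcases le_total (g lo) (g (hi - 1)) with h | h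
        · rw [max_eq_right h, max_eq_left h, abs_sub_comm, abs_of_nonneg (by omega)]; ring
        · rw [max_eq_left h, max_eq_right h, abs_of_nonneg (by omega)]; ring
      have hdiv : (m + 2) / 2 = m / 2 + 1 := by omega
      rw [hdiv, Finset.sum_range_succ']
      have hshift : ∀ j ∈ Finset.range (m / 2),
          |g (lo + (j + 1)) - g (hi - 1 - (j + 1))| = |g (lo + 1 + j) - g (hi - 1 - 1 - j)| := by
        intro j hj
        have e1 : lo + (j + 1) = lo + 1 + j := by omega
        have e2 : hi - 1 - (j + 1) = hi - 1 - 1 - j := by omega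
        rw [e1, e2]
      rw [Finset.sum_congr rfl hshift]
      simp only [add_zero, Nat.sub_zero]
      omega

-- the two list sums of B, as Finset.range sums over getD
theorem sum_eq_range (xs : List Int) :
    xs.sum = ∑ i ∈ Finset.range xs.length, xs.getD i 0 := by
  have h : (List.range xs.length).map (fun i => xs.getD i 0) = xs := by
    apply List.ext_getElem
    · simp
    · intro i h1 h2
      simp [List.getD_eq_getElem?_getD, List.getElem?_eq_getElem (by simpa using h2)]
  conv_lhs => rw [← h]
  rfl

theorem zipmax_eq_range (xs : List Int) :
    ((xs.zip xs.reverse).map (fun p => max p.1 p.2)).sum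
      = ∑ i ∈ Finset.range xs.length, max (xs.getD i 0) (xs.getD (xs.length - 1 - i) 0) := by
  have h : (xs.zip xs.reverse).map (fun p => max p.1 p.2)
      = (List.range xs.length).map
          (fun i => max (xs.getD i 0) (xs.getD (xs.length - 1 - i) 0)) := by
    apply List.ext_getElem
    · simp
    · intro i h1 h2
      simp only [List.getElem_map, List.getElem_zip, List.getElem_reverse, List.getElem_range]
      have hi : i < xs.length := by simpa using h2
      rw [List.getD_eq_getElem?_getD, List.getElem?_eq_getElem hi,
          List.getD_eq_getElem?_getD, List.getElem?_eq_getElem (by omega : xs.length - 1 - i < xs.length)]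
      rfl
  rw [h]; rfl

theorem first_wins_alt_eq (xs : List Int) :
    first_wins_alt xs = decide (halfSum xs > 0) := by
  unfold first_wins_alt
  have hfd : PySem.Int.floordiv (xs.length : Int) 2 = ((xs.length / 2 : Nat) : Int) :=
    PySem.Int.floordiv_natCast xs.length 2
  have hmd : PySem.Int.mod (xs.length : Int) 2 = ((xs.length % 2 : Nat) : Int) :=
    PySem.Int.mod_natCast xs.length 2
  simp only [hfd, hmd, PySem.List.pyGetD_natCast]
  have hzip := zipmax_eq_range xs
  have hsum := sum_eq_range xs
  have hwin := maxWindow (fun i => xs.getD i 0) xs.length 0 xs.length (by omega) (by omega)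
  simp only [zero_add] at hwin
  rw [Finset.range_eq_Ico] at hzip hsum
  have hmargin : ((xs.zip xs.reverse).map (fun p => max p.1 p.2)).sum
      = xs.sum + pairSum xs := by
    rw [hzip, hwin, hsum]
    unfold pairSum
    rw [Finset.range_eq_Ico]
  rw [hmargin]
  unfold halfSum
  have hc : (((xs.length % 2 : Nat)) : Int) = 1 ↔ xs.length % 2 = 1 := by
    constructor <;> (intro h; omega)
  by_cases h : xs.length % 2 = 1
  · rw [if_pos (hc.mpr h), if_pos h]
    simp only [decide_eq_decide]
    omega
  · rw [if_neg (fun hh => h (hc.mp hh)), if_neg h]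
    simp only [decide_eq_decide]
    omega

-- ===== VERDICT (by name: the statement is the Claim_ definition above) =====
theorem first_wins_spec : Claim_equal_first_wins := by
  intro xs _
  unfold Spec_first_wins
  rw [first_wins_alt_eq]
  unfold first_wins
  have h := firstWinsLoop_margin xs 0 ((xs.length : Int) - 1) 0 0
  rw [pairD_eq_halfSum] at h
  simp only [decide_eq_decide]
  omega
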